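-- pv_equiv track=rewrite | github.com/tejasborde/DSA-Problems | String/Problem-12.py | balancedSubstrings
-- ===== SOURCE A (Python) =====
-- def balancedSubstrings(s):
--
--     n=len(s)
--     zeroCount=0
--     oneCount=0
--
--     count=0
--     for i in range(n):
--         if(s[i]=='0'):
--             zeroCount+=1
--         else:
--             oneCount+=1
--
--         if(oneCount==zeroCount):
--             count+=1
--     if(oneCount!=zeroCount):
--         return -1
--     return count
-- ===== SOURCE B (Python) =====
-- def balancedSubstrings(s):
--     # Greedy recursion: split off the shortest balanced block, count it, recurse on the rest.
--     bal = 0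
--     for k, c in enumerate(s):
--         bal += -1 if c == '0' else 1
--         if bal == 0:
--             rest = balancedSubstrings(s[k + 1:])
--             return -1 if rest == -1 else 1 + rest
--     return -1 if s else 0
-- ===== Notes on version B (the rewrite author's own statement) =====
-- stated objective: alternative
-- what changed: B is a greedy recursive block-splitter: it finds the shortest balanced prefix, counts it as one block and recurses on the remaining suffix (returning -1 if the leftover tail never balances), instead of A's single linear pass with zero/one counters and a per-step equality test.
import Mathlib
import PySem

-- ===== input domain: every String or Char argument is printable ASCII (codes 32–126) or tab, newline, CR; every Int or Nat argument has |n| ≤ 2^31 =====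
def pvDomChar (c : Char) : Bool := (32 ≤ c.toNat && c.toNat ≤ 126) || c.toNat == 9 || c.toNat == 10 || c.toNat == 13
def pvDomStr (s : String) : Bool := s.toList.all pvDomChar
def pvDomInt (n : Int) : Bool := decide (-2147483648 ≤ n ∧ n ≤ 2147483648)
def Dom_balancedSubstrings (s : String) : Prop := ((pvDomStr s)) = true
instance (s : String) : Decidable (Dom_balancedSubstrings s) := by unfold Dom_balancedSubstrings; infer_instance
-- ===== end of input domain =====

-- B is a greedy recursive block-splitter (shortest balanced prefix, then recurse on the rest) instead of A's single pass with counters: alternative decomposition, same cost.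

-- ===== PORT A =====
-- A's loop state: (zeroCount, oneCount, count), updated per character in order.
def balancedSubstringsStep (st : Int × Int × Int) (c : Char) : Int × Int × Int :=
  let z := if c = '0' then st.1 + 1 else st.1
  let o := if c = '0' then st.2.1 else st.2.1 + 1
  let cnt := if o = z then st.2.2 + 1 else st.2.2
  (z, o, cnt)

def balancedSubstrings (s : String) : Int :=
  let st := s.toList.foldl balancedSubstringsStep (0, 0, 0)
  if st.2.1 ≠ st.1 then -1 else st.2.2

-- ===== PORT B =====
-- B's inner loop: scan accumulating `bal`; at the first zero balance return the remaining suffix.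
def balancedSubstringsFirstSplit (bal : Int) : List Char → Option (List Char)
  | [] => none
  | c :: cs =>
      let t := bal + (if c = '0' then -1 else 1)
      if t = 0 then some cs else balancedSubstringsFirstSplit t cs

-- Termination measure for B's recursion (the port cites it in `decreasing_by`).
lemma balancedSubstringsFirstSplit_length_lt :
    ∀ (l : List Char) (b : Int) (rest : List Char),
      balancedSubstringsFirstSplit b l = some rest → rest.length < l.length := by
  intro l
  induction l with
  | nil => intro b rest h; simp [balancedSubstringsFirstSplit] at h
  | cons c cs ih =>
      intro b rest h
      by_cases ht : b + (if c = '0' then -1 else 1) = 0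
      · simp only [balancedSubstringsFirstSplit, if_pos ht] at h
        cases h; simp
      · simp only [balancedSubstringsFirstSplit, if_neg ht] at h
        have := ih _ _ h
        simp; omega

def balancedSubstringsAltRec (l : List Char) : Int :=
  match h : balancedSubstringsFirstSplit 0 l with
  | some rest =>
      let r := balancedSubstringsAltRec rest
      if r = -1 then -1 else 1 + r
  | none => if l = [] then 0 else -1
termination_by l.length
decreasing_by exact balancedSubstringsFirstSplit_length_lt l 0 rest h

def balancedSubstrings_alt (s : String) : Int := balancedSubstringsAltRec s.toList

-- ===== PRECONDITION & SPEC =====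
def Spec_balancedSubstrings (s : String) (out : Int) : Prop := out = balancedSubstrings_alt s
instance (s : String) (out : Int) : Decidable (Spec_balancedSubstrings s out) := by unfold Spec_balancedSubstrings; infer_instance

-- ===== CLAIM (what is proved, stated in full; the proofs are below) =====
def Claim_equal_balancedSubstrings : Prop := ∀ (s : String), Dom_balancedSubstrings s → Spec_balancedSubstrings s (balancedSubstrings s)

-- ===== LEMMAS AND PROOFS =====

/-- Proof-only prefix-balance table starting from `total`. -/
def balancedSubstringsSums (total : Int) : List Char → List Int
  | [] => []
  | c :: cs =>
      let t := total + (if c = '0' then -1 else 1)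
      t :: balancedSubstringsSums t cs

/-- A's fold state vs the prefix-balance table: final balance `one - zero` is the
table's last entry, and the final count adds the number of zeros in the table. -/
lemma balancedSubstrings_inv (l : List Char) : ∀ (z o cnt : Int),
    ((l.foldl balancedSubstringsStep (z, o, cnt)).2.1
      - (l.foldl balancedSubstringsStep (z, o, cnt)).1
        = (balancedSubstringsSums (o - z) l).getLastD (o - z))
    ∧ ((l.foldl balancedSubstringsStep (z, o, cnt)).2.2
      = cnt + ((balancedSubstringsSums (o - z) l).count 0 : Int)) := by
  induction l with
  | nil => intro z o cnt; simp [balancedSubstringsSums]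
  | cons c cs ih =>
      intro z o cnt
      have hstep : balancedSubstringsStep (z, o, cnt) c =
          ((if c = '0' then z + 1 else z),
           (if c = '0' then o else o + 1),
           (if (if c = '0' then o else o + 1) = (if c = '0' then z + 1 else z)
              then cnt + 1 else cnt)) := by
        simp [balancedSubstringsStep]
      obtain ⟨ih1, ih2⟩ := ih (if c = '0' then z + 1 else z)
        (if c = '0' then o else o + 1)
        (if (if c = '0' then o else o + 1) = (if c = '0' then z + 1 else z)
           then cnt + 1 else cnt)
      have ht : (if c = '0' then o else o + 1) - (if c = '0' then z + 1 else z)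
          = (o - z) + (if c = '0' then -1 else 1) := by
        by_cases h : c = '0' <;> simp [h] <;> ring
      constructor
      · simp only [List.foldl_cons, hstep, balancedSubstringsSums, List.getLastD_cons]
        rw [ih1, ht]
      · simp only [List.foldl_cons, hstep, balancedSubstringsSums]
        rw [ih2, ht]
        by_cases h0 : (o - z) + (if c = '0' then -1 else 1) = 0
        · have heq : (if c = '0' then o else o + 1) = (if c = '0' then z + 1 else z) := by
            by_cases h : c = '0' <;> simp [h] at h0 ⊢ <;> omega
          simp [heq, h0]
          ring
        · have hne : (if c = '0' then o else o + 1) ≠ (if c = '0' then z + 1 else z) := by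
            by_cases h : c = '0' <;> simp [h] at h0 ⊢ <;> omega
          simp [hne, h0]

/-- `firstSplit` vs the prefix-balance table: a failed scan has no zero in the
table; a successful one preserves the final balance and drops exactly one zero. -/
lemma balancedSubstringsFirstSplit_spec (l : List Char) : ∀ (b : Int),
    (balancedSubstringsFirstSplit b l = none →
      (balancedSubstringsSums b l).count 0 = 0)
    ∧ (∀ rest, balancedSubstringsFirstSplit b l = some rest →
        (balancedSubstringsSums b l).getLastD b
          = (balancedSubstringsSums 0 rest).getLastD 0
        ∧ (balancedSubstringsSums b l).count 0
          = (balancedSubstringsSums 0 rest).count 0 + 1) := by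
  induction l with
  | nil =>
      intro b
      refine ⟨fun _ => by simp [balancedSubstringsSums], fun rest h => ?_⟩
      simp [balancedSubstringsFirstSplit] at h
  | cons c cs ih =>
      intro b
      obtain ⟨ihn, ihs⟩ := ih (b + (if c = '0' then -1 else 1))
      constructor
      · intro h
        by_cases ht : b + (if c = '0' then -1 else 1) = 0
        · simp [balancedSubstringsFirstSplit, if_pos ht] at h
        · simp only [balancedSubstringsFirstSplit, if_neg ht] at h
          simp only [balancedSubstringsSums, List.count_cons]
          rw [ihn h]
          simp [ht]
      · intro rest h
        by_cases ht : b + (if c = '0' then -1 else 1) = 0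
        · simp only [balancedSubstringsFirstSplit, if_pos ht] at h
          cases h
          simp only [balancedSubstringsSums, List.getLastD_cons, List.count_cons, ht]
          simp
        · simp only [balancedSubstringsFirstSplit, if_neg ht] at h
          obtain ⟨h1, h2⟩ := ihs rest h
          simp only [balancedSubstringsSums, List.getLastD_cons, List.count_cons]
          refine ⟨h1, ?_⟩
          rw [h2]; simp [ht]

/-- The recursive splitter computes the table-based answer. -/
lemma balancedSubstringsAltRec_eq (l : List Char) :
    balancedSubstringsAltRec l =
      if (balancedSubstringsSums 0 l).getLastD 0 ≠ 0 then -1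
      else ((balancedSubstringsSums 0 l).count 0 : Int) := by
  induction hn : l.length using Nat.strong_induction_on generalizing l with
  | _ n ih =>
    subst hn
    rw [balancedSubstringsAltRec]
    obtain ⟨hnone, hsome⟩ := balancedSubstringsFirstSplit_spec l 0
    split
    · rename_i rest h
      obtain ⟨h1, h2⟩ := hsome rest h
      have hlt := balancedSubstringsFirstSplit_length_lt l 0 rest h
      rw [ih rest.length hlt rest rfl]
      simp only [List.getLastD_eq_getLast?] at h1 ⊢
      by_cases hz : (balancedSubstringsSums 0 rest).getLast?.getD 0 = 0
      · have hnn : (0 : Int) ≤ ((balancedSubstringsSums 0 rest).count 0 : Int) :=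
          Int.natCast_nonneg _
        have hne1 : ((balancedSubstringsSums 0 rest).count 0 : Int) ≠ -1 := by omega
        simp [hz, hne1, h1, h2]
        ring
      · simp [hz, h1]
    · rename_i h
      have hc := hnone h
      by_cases hl : l = []
      · subst hl; simp [balancedSubstringsSums]
      · have hmem : (balancedSubstringsSums 0 l).getLastD 0
            ∈ balancedSubstringsSums 0 l := by
          have hne : balancedSubstringsSums 0 l ≠ [] := by
            cases l with
            | nil => exact absurd rfl hl
            | cons c cs => simp [balancedSubstringsSums]
          rw [List.getLastD_eq_getLast? , List.getLast?_eq_some_getLast hne]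
          simp [List.getLast_mem]
        have hlast : (balancedSubstringsSums 0 l).getLastD 0 ≠ 0 := by
          intro h0
          rw [h0] at hmem
          exact absurd (List.count_pos_iff.mpr hmem) (by omega)
        simp only [List.getLastD_eq_getLast?] at hlast
        simp [hl, hlast]

-- ===== VERDICT (by name: the statement is the Claim_ definition above) =====
theorem balancedSubstrings_spec : Claim_equal_balancedSubstrings := by
  intro s _
  unfold Spec_balancedSubstrings balancedSubstrings balancedSubstrings_alt
  obtain ⟨h1, h2⟩ := balancedSubstrings_inv s.toList 0 0 0
  simp only [sub_zero] at h1 h2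
  rw [balancedSubstringsAltRec_eq]
  set st := s.toList.foldl balancedSubstringsStep ((0 : Int), (0 : Int), (0 : Int)) with hst
  by_cases h : st.2.1 = st.1
  · have hz : (balancedSubstringsSums 0 s.toList).getLastD 0 = 0 := by rw [← h1]; omega
    simp only [List.getLastD_eq_getLast?] at hz
    simp [h, hz, h2]
  · have hne : (balancedSubstringsSums 0 s.toList).getLastD 0 ≠ 0 := by rw [← h1]; omega
    simp only [List.getLastD_eq_getLast?] at hne
    simp [h, hne]
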